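-- pv_equiv track=rewrite | github.com/xl666/recursosEstructuras24 | ordinario/estudiantes/Amacalli/Parcial2_SEC/perteneceRecursividad_Do.py | pertenece
-- ===== SOURCE A (Python) =====
-- def pertenece(elemento: str, lista: list) -> None:
--     """
--     Determina si el elemento pertence a la lista
--     """
--     if not lista:
--         return False
--     frente = lista[0]
--     resto = lista[1:]
--     if frente == elemento:
--         return True
--     return pertenece(elemento, resto)
-- ===== SOURCE B (Python) =====
-- def pertenece(elemento: str, lista: list) -> None:
--     """
--     Determina si el elemento pertence a la lista
--     """
--     for frente in lista:
--         if frente == elemento: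
--             return True
--     return False
-- ===== Notes on version B (the rewrite author's own statement) =====
-- stated objective: simpler
-- what changed: Replaced the recursive head/tail decomposition (which slices a new list at every step) with a single explicit iterative scan over the list.
import Mathlib
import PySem

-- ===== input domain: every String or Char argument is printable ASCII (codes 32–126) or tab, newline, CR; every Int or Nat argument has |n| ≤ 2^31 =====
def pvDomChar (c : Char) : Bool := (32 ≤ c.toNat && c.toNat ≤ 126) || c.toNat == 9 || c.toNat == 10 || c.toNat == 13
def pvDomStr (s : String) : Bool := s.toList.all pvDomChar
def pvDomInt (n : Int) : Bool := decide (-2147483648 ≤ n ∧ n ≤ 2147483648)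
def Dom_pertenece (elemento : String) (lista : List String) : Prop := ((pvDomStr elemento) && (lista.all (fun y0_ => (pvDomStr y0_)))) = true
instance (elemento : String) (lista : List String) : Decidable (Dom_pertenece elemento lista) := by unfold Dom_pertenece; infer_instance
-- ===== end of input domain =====

-- B replaces A's list-slicing recursion with a single iterative scan (avoids A's per-step list slice).


-- ===== PORT A =====
-- Literal port of A: recursion on the list; frente = lista[0], resto = lista[1:]
def pertenece (elemento : String) (lista : List String) : Bool :=
  match lista with
  | [] => false
  | frente :: resto =>
    if frente == elemento then true
    else pertenece elemento resto

-- ===== PORT B =====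
-- Port of B: an iterative scan (for-loop with early True) as a fold over the list
def pertenece_alt (elemento : String) (lista : List String) : Bool :=
  lista.foldl (fun acc frente => acc || (frente == elemento)) false

-- ===== PRECONDITION & SPEC =====
def Spec_pertenece (elemento : String) (lista : List String) (out : Bool) : Prop := out = pertenece_alt elemento lista
instance (elemento : String) (lista : List String) (out : Bool) : Decidable (Spec_pertenece elemento lista out) := by unfold Spec_pertenece; infer_instance

-- ===== CLAIM (what is proved, stated in full; the proofs are below) =====
def Claim_equal_pertenece : Prop := ∀ (elemento : String) (lista : List String), Dom_pertenece elemento lista → Spec_pertenece elemento lista (pertenece elemento lista)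

-- ===== LEMMAS AND PROOFS =====

-- ===== VERDICT (by name: the statement is the Claim_ definition above) =====
theorem foldl_or_true (elemento : String) (lista : List String) :
    lista.foldl (fun acc frente => acc || (frente == elemento)) true = true := by
  induction lista with
  | nil => rfl
  | cons x xs ih => simpa using ih

theorem pertenece_eq_alt (elemento : String) (lista : List String) :
    pertenece elemento lista = pertenece_alt elemento lista := by
  induction lista with
  | nil => rfl
  | cons x xs ih =>
    simp only [pertenece, pertenece_alt, List.foldl, Bool.false_or]
    by_cases h : x == elemento
    · simp [h, foldl_or_true]
    · simp only [h]
      simpa [pertenece_alt] using ih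

theorem pertenece_spec : Claim_equal_pertenece := by
  intro elemento lista _
  unfold Spec_pertenece
  exact pertenece_eq_alt elemento lista
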